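-- pv_equiv track=rewrite | github.com/sebbienvenue/seb352-travail | Essais/exo_livre_10_6.py | n_mots
-- ===== SOURCE A (Python) =====
-- def n_mots(phrase):
--     "Revoit le nombre de mots dans la phrase"
--     #exo 10_7
--     ok = 0
--     for e in phrase:
--         if e == " ":
--             ok += 1
--         elif e == ".":
--             return ok
--     return ok
-- ===== SOURCE B (Python) =====
-- def n_mots(phrase):
--     "Revoit le nombre de mots dans la phrase"
--     mots = phrase.split(" ")
--     for i, m in enumerate(mots):
--         if "." in m:
--             return i
--     return len(mots) - 1
-- ===== Notes on version B (the rewrite author's own statement) =====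
-- stated objective: alternative
-- what changed: Instead of scanning characters with an early return, B splits the phrase into space-separated chunks and returns the index of the first chunk containing a period, or number of chunks minus one if none does.
import Mathlib
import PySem

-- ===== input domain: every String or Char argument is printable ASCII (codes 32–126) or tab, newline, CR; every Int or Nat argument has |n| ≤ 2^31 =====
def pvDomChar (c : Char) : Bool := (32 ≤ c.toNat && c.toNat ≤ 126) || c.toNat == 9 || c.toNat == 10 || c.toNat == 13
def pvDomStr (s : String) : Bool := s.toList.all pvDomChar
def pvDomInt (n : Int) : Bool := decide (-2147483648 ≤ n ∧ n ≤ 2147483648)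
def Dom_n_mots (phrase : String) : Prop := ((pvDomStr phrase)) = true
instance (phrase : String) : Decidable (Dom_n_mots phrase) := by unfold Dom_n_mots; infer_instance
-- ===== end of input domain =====

-- B replaces A's fused char scan with early return by a different decomposition: split the
-- phrase into space-separated chunks and return the index of the first chunk containing '.',
-- or (number of chunks - 1) if none does.

-- ===== PORT A =====
-- loop of A: early return on '.', accumulate on ' '
def nMotsLoop : List Char → Int → Int
  | [], ok => ok
  | c :: rest, ok =>
    if c = ' ' then nMotsLoop rest (ok + 1)
    else if c = '.' then ok
    else nMotsLoop rest ok

def n_mots (phrase : String) : Int := nMotsLoop phrase.toList 0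

-- ===== PORT B =====
-- B's for-loop over enumerate(mots): first chunk containing '.', with its index
def nMotsAltScan : List (List Char) → Int → Option Int
  | [], _ => none
  | m :: ms, i => if PySem.Chars.isIn ['.'] m then some i else nMotsAltScan ms (i + 1)

def n_mots_alt (phrase : String) : Int :=
  let mots := PySem.Chars.splitOn phrase.toList [' ']
  match nMotsAltScan mots 0 with
  | some i => i
  | none => (mots.length : Int) - 1

-- ===== PRECONDITION & SPEC =====
def Spec_n_mots (phrase : String) (out : Int) : Prop := out = n_mots_alt phrase
instance (phrase : String) (out : Int) : Decidable (Spec_n_mots phrase out) := by unfold Spec_n_mots; infer_instance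

-- ===== CLAIM =====
def Claim_equal_n_mots : Prop := ∀ (phrase : String), Dom_n_mots phrase → Spec_n_mots phrase (n_mots phrase)

-- ===== LEMMAS AND PROOFS =====

-- reference single-char-separator split
def spSpace : List Char → List (List Char)
  | [] => [[]]
  | c :: rest =>
    if c = ' ' then [] :: spSpace rest
    else match spSpace rest with
      | w :: ws => (c :: w) :: ws
      | [] => [[c]]

theorem spSpace_ne_nil (l : List Char) : spSpace l ≠ [] := by
  cases l with
  | nil => simp [spSpace]
  | cons c rest =>
    simp only [spSpace]
    split_ifs
    · simp
    · cases h : spSpace rest <;> simp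

theorem splitOn_go_eq (l : List Char) : ∀ (fuel : Nat), l.length ≤ fuel →
    ∀ (cur : List Char) (acc : List (List Char)),
    PySem.Chars.splitOn.go [' '] fuel l cur acc =
      acc.reverse ++ (match spSpace l with
        | w :: ws => (cur.reverse ++ w) :: ws
        | [] => [cur.reverse]) := by
  induction l with
  | nil =>
    intro fuel _ cur acc
    cases fuel <;> simp [PySem.Chars.splitOn.go, spSpace]
  | cons c rest ih =>
    intro fuel hf cur acc
    cases fuel with
    | zero => simp at hf
    | succ fuel =>
      have hf' : rest.length ≤ fuel := by simpa using hf
      by_cases hs : c = ' '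
      · subst hs
        have : List.isPrefixOf [' '] (' ' :: rest) = true := by
          simp [List.isPrefixOf]
        simp only [PySem.Chars.splitOn.go, this, if_pos]
        simp only [List.length_cons, List.length_nil, List.drop_succ_cons, List.drop_zero]
        rw [ih fuel hf' [] (cur.reverse :: acc)]
        rcases h : spSpace rest with _ | ⟨w, ws⟩
        · exact absurd h (spSpace_ne_nil rest)
        · simp [spSpace, h]
      · have : List.isPrefixOf [' '] (c :: rest) = false := by
          simp [List.isPrefixOf]
          intro h; exact hs h.symm
        simp only [PySem.Chars.splitOn.go, this, Bool.false_eq_true, if_false]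
        rw [ih fuel hf' (c :: cur) acc]
        rcases h : spSpace rest with _ | ⟨w, ws⟩
        · exact absurd h (spSpace_ne_nil rest)
        · simp [spSpace, hs, h]

theorem splitOn_space_eq (l : List Char) :
    PySem.Chars.splitOn l [' '] = spSpace l := by
  show PySem.Chars.splitOn.go [' '] (l.length + 1) l [] [] = spSpace l
  rw [splitOn_go_eq l (l.length + 1) (by omega) [] []]
  rcases h : spSpace l with _ | ⟨w, ws⟩
  · exact absurd h (spSpace_ne_nil l)
  · simp

theorem isIn_dot_iff (l : List Char) : PySem.Chars.isIn ['.'] l = true ↔ '.' ∈ l := by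
  rw [PySem.Chars.isIn_iff_infix]
  constructor
  · rintro ⟨s, t, h⟩
    subst h; simp
  · intro h
    rcases List.append_of_mem h with ⟨s, t, h⟩
    exact ⟨s, t, by simp [h]⟩

theorem nMotsAltScan_shift (ms : List (List Char)) (i : Int) :
    nMotsAltScan ms i = (nMotsAltScan ms 0).map (· + i) := by
  induction ms generalizing i with
  | nil => simp [nMotsAltScan]
  | cons m ms ih =>
    simp only [nMotsAltScan]
    split_ifs
    · simp
    · rw [ih (i + 1), show (0 : Int) + 1 = 1 from rfl, ih 1]
      cases nMotsAltScan ms 0 <;> simp <;> ring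

-- the B-side value as a function of the char list
def bVal (cs : List Char) : Int :=
  match nMotsAltScan (spSpace cs) 0 with
  | some i => i
  | none => ((spSpace cs).length : Int) - 1

theorem bVal_eq_count (cs : List Char) :
    bVal cs = ((cs.takeWhile (fun c => c ≠ '.')).count ' ' : Int) := by
  induction cs with
  | nil => simp [bVal, spSpace, nMotsAltScan, isIn_dot_iff]
  | cons c rest ih =>
    by_cases hs : c = ' '
    · subst hs
      have hnotin : PySem.Chars.isIn ['.'] ([] : List Char) = false := by
        rw [← Bool.not_eq_true]; simp [isIn_dot_iff]
      have hlen : 1 ≤ (spSpace rest).length :=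
        List.length_pos_of_ne_nil (spSpace_ne_nil rest)
      have hrest := ih
      simp only [bVal] at hrest ⊢
      have hsp : spSpace (' ' :: rest) = [] :: spSpace rest := by simp [spSpace]
      rw [hsp]
      simp only [nMotsAltScan, hnotin, Bool.false_eq_true, if_false]
      rw [show (0 : Int) + 1 = 1 from rfl, nMotsAltScan_shift (spSpace rest) 1]
      rw [List.takeWhile_cons_of_pos (by simp)]
      rcases hscan : nMotsAltScan (spSpace rest) 0 with _ | k
      · rw [hscan] at hrest
        simp only [Option.map_none, List.length_cons, List.count_cons_self] at hrest ⊢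
        push_cast at hrest ⊢
        omega
      · rw [hscan] at hrest
        simp only [Option.map_some, List.count_cons_self] at hrest ⊢
        push_cast at hrest ⊢
        omega
    · by_cases hd : c = '.'
      · subst hd
        rcases h : spSpace rest with _ | ⟨w, ws⟩
        · exact absurd h (spSpace_ne_nil rest)
        · have hin : PySem.Chars.isIn ['.'] ('.' :: w) = true := by
            rw [isIn_dot_iff]; simp
          simp [bVal, spSpace, h, nMotsAltScan, hin, List.takeWhile]
      · rcases h : spSpace rest with _ | ⟨w, ws⟩
        · exact absurd h (spSpace_ne_nil rest)
        · have hiff : PySem.Chars.isIn ['.'] (c :: w) = PySem.Chars.isIn ['.'] w := by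
            rcases hb : PySem.Chars.isIn ['.'] w with _ | _
            · rw [← Bool.not_eq_true] at hb ⊢
              rw [isIn_dot_iff] at hb ⊢
              simp [hb, Ne.symm hd]
            · rw [isIn_dot_iff] at hb ⊢
              simp [hb]
          have hrest := ih
          simp only [bVal, h, nMotsAltScan] at hrest
          simp only [bVal, spSpace, hs, if_false, h, nMotsAltScan, hiff]
          simp only [List.takeWhile]
          simp only [List.length_cons] at hrest ⊢
          rw [decide_eq_true (show (c ≠ '.') from hd)]
          simpa [List.count_cons, hs] using hrest

theorem nMotsLoop_eq (l : List Char) (ok : Int) :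
    nMotsLoop l ok = ok + ((l.takeWhile (fun c => c ≠ '.')).count ' ' : Int) := by
  induction l generalizing ok with
  | nil => simp [nMotsLoop]
  | cons c rest ih =>
    by_cases hs : c = ' '
    · subst hs
      simp [nMotsLoop, List.takeWhile, ih]
      ring
    · by_cases hd : c = '.'
      · subst hd
        simp [nMotsLoop, List.takeWhile]
      · simp [nMotsLoop, hs, hd, List.takeWhile, ih]

-- ===== VERDICT =====
theorem n_mots_spec : Claim_equal_n_mots := by
  intro phrase _
  unfold Spec_n_mots n_mots n_mots_alt
  rw [nMotsLoop_eq, splitOn_space_eq]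
  have := bVal_eq_count phrase.toList
  simp only [bVal] at this
  simpa using this.symm
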